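-- pv_equiv track=rewrite | github.com/ChengDe1996/NTU-IR | R08922A04_hw2/Preprocess.py | pos_neg_sep
-- ===== SOURCE A (Python) =====
-- def pos_neg_sep(data, max_item):
-- 	positive = []
-- 	negative = []
-- 	for row in data:
-- 		temp_pos, temp_neg = [],[]
-- 		row_set = set()
-- 		for e in row:
-- 			row_set.update([e])
-- 		for i in range(max_item):
-- 			if i in row_set:
-- 				temp_pos.append(i)
-- 			else:
-- 				temp_neg.append(i)
-- 		positive.append(temp_pos)
-- 		negative.append(temp_neg)
-- 	return positive, negative
-- ===== SOURCE B (Python) =====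
-- def pos_neg_sep(data, max_item):
--     universe = set(range(max_item))
--     positive, negative = [], []
--     for row in data:
--         s = set(row)
--         positive.append(sorted(s & universe))
--         negative.append(sorted(universe - s))
--     return positive, negative
-- ===== Notes on version B (the rewrite author's own statement) =====
-- stated objective: idiomatic
-- what changed: Replaces the per-index membership-branch scan over range(max_item) with a universe set built once and per-row set intersection/difference plus a sort.
import Mathlib
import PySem

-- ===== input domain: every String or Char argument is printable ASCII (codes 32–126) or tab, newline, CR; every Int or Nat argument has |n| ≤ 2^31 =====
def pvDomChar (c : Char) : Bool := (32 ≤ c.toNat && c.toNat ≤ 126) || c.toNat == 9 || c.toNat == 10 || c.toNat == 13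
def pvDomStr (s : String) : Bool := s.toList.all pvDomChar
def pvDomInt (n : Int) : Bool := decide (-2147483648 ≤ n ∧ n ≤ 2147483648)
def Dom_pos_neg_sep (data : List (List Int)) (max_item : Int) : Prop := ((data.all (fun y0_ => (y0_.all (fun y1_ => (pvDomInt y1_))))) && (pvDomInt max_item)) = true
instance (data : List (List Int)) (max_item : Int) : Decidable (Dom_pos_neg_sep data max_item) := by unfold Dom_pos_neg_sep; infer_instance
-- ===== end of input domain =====

-- B builds a universe set once and uses per-row set intersection/difference plus a sort instead of
-- A's per-index membership-branch scan over range(max_item); same return value, idiomatic objective.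

-- ===== PORT A =====
def pos_neg_sep (data : List (List Int)) (max_item : Int) : List (List Int) × List (List Int) :=
  data.foldl (fun acc row =>
    let row_set := row.foldl (fun s e => PySem.Set.update s [e]) PySem.Set.empty
    let tpn := (PySem.List.pyRange 0 max_item 1).foldl
      (fun (t : List Int × List Int) i =>
        if PySem.Set.contains row_set i then (t.1 ++ [i], t.2) else (t.1, t.2 ++ [i]))
      ([], [])
    (acc.1 ++ [tpn.1], acc.2 ++ [tpn.2])) ([], [])

-- ===== PORT B =====
def pos_neg_sep_alt (data : List (List Int)) (max_item : Int) : List (List Int) × List (List Int) :=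
  let univ_ := PySem.Set.ofList (PySem.List.pyRange 0 max_item 1)
  data.foldl (fun acc row =>
    let s := PySem.Set.ofList row
    (acc.1 ++ [PySem.List.sorted (PySem.Set.inter s univ_) (fun x => x) false],
     acc.2 ++ [PySem.List.sorted (PySem.Set.diff univ_ s) (fun x => x) false])) ([], [])

-- ===== PRECONDITION & SPEC =====
def Spec_pos_neg_sep (data : List (List Int)) (max_item : Int) (out : List (List Int) × List (List Int)) : Prop := out = pos_neg_sep_alt data max_item
instance (data : List (List Int)) (max_item : Int) (out : List (List Int) × List (List Int)) : Decidable (Spec_pos_neg_sep data max_item out) := by unfold Spec_pos_neg_sep; infer_instance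

-- ===== CLAIM (what is proved, stated in full; the proofs are below) =====
def Claim_equal_pos_neg_sep : Prop := ∀ (data : List (List Int)) (max_item : Int), Dom_pos_neg_sep data max_item → Spec_pos_neg_sep data max_item (pos_neg_sep data max_item)

-- ===== LEMMAS AND PROOFS =====

-- A's row_set accumulation set.update([e]) per element is set(row)
theorem rowset_eq (row : List Int) :
    row.foldl (fun s e => PySem.Set.update s [e]) PySem.Set.empty = PySem.Set.ofList row := by
  have h : ∀ (l : List Int) (s : PySem.Set Int),
      l.foldl (fun s e => PySem.Set.update s [e]) s = l.foldl PySem.Set.add s := by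
    intro l
    induction l with
    | nil => intro s; rfl
    | cons x xs ih =>
      intro s
      simp only [List.foldl, PySem.Set.update]
  rw [h, PySem.Set.ofList_eq_foldl]
  rfl

-- A's classification loop collects the two filters of the range
theorem pairfold_eq (c : Int → Bool) (l : List Int) (tp tn : List Int) :
    l.foldl (fun (t : List Int × List Int) i =>
        if c i then (t.1 ++ [i], t.2) else (t.1, t.2 ++ [i])) (tp, tn)
      = (tp ++ l.filter c, tn ++ l.filter (fun i => !(c i))) := by
  induction l generalizing tp tn with
  | nil => simp
  | cons x xs ih =>
    by_cases h : c x = true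
    · simp [List.foldl, h, ih]
    · simp only [Bool.not_eq_true] at h
      simp [List.foldl, h, ih]

theorem filter_pos_eq (row : List Int) (max_item : Int) :
    PySem.List.sorted (PySem.Set.inter (PySem.Set.ofList row) (PySem.Set.ofList (PySem.List.pyRange 0 max_item 1))) (fun x => x) false
      = (PySem.List.pyRange 0 max_item 1).filter (fun i => PySem.Set.contains (PySem.Set.ofList row) i) := by
  apply PySem.List.sorted_eq_of_perm_of_pairwise_lt
  · rw [List.perm_ext_iff_of_nodup]
    · intro a
      simp [PySem.Set.mem_inter, PySem.Set.mem_ofList, List.mem_filter, and_comm]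
    · exact List.Nodup.filter _ (PySem.List.nodup_pyRange_one 0 max_item)
    · exact PySem.Set.nodup_inter (PySem.Set.ofList row) _ (PySem.Set.nodup_ofList row)
  · exact (PySem.List.pairwise_lt_pyRange_one 0 max_item).filter _

theorem filter_neg_eq (row : List Int) (max_item : Int) :
    PySem.List.sorted (PySem.Set.diff (PySem.Set.ofList (PySem.List.pyRange 0 max_item 1)) (PySem.Set.ofList row)) (fun x => x) false
      = (PySem.List.pyRange 0 max_item 1).filter (fun i => !(PySem.Set.contains (PySem.Set.ofList row) i)) := by
  apply PySem.List.sorted_eq_of_perm_of_pairwise_lt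
  · rw [List.perm_ext_iff_of_nodup]
    · intro a
      simp [PySem.Set.mem_diff, PySem.Set.mem_ofList, List.mem_filter]
    · exact List.Nodup.filter _ (PySem.List.nodup_pyRange_one 0 max_item)
    · exact PySem.Set.nodup_diff (PySem.Set.ofList (PySem.List.pyRange 0 max_item 1)) _ (PySem.Set.nodup_ofList _)
  · exact (PySem.List.pairwise_lt_pyRange_one 0 max_item).filter _

-- ===== VERDICT (by name: the statement is the Claim_ definition above) =====
theorem pos_neg_sep_spec : Claim_equal_pos_neg_sep := by
  intro data max_item _
  unfold Spec_pos_neg_sep pos_neg_sep pos_neg_sep_alt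
  apply List.foldl_ext
  intro acc row _
  simp only [rowset_eq, pairfold_eq, List.nil_append, filter_pos_eq, filter_neg_eq]
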